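-- pv_equiv track=rewrite | github.com/sae13/DataStructureBook | 1-5.py | charINnewline
-- ===== SOURCE A (Python) =====
-- def charINnewline(str):
--     if str[0] == '0':
--         str = str[1:]
--     arz = len(str)
--     if arz == 1:
--         return str + '\n'
--     else:
--         return str[0] + '\n' + charINnewline(str[1:])
-- ===== SOURCE B (Python) =====
-- def charINnewline(str):
--     n = len(str)
--     parts = []
--     i = 0
--     while True:
--         if str[i] == '0':
--             i += 1
--         parts.append(str[i] + '\n')
--         if i == n - 1:
--             return ''.join(parts)
--         i += 1
-- ===== Notes on version B (the rewrite author's own statement) =====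
-- stated objective: faster
-- what changed: Replaces A's recursion that rebuilds string slices and concatenates at every step (O(n^2) and O(n) recursion depth) by a single index-based while-loop over the fixed string that collects the pieces and joins them once.
import Mathlib
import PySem

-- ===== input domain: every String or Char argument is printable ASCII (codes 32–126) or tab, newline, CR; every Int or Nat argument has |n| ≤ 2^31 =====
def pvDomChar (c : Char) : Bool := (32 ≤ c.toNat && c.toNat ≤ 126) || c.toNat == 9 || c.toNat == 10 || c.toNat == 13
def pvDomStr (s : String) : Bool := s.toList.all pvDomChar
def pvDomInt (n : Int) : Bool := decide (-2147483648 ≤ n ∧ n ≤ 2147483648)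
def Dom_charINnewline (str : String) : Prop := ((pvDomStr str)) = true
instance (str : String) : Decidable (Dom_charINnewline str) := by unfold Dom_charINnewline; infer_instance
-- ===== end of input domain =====

-- B replaces A's O(n^2) recursion on string slices by a single index-based pass
-- that joins the collected pieces once (objective: faster).

-- ===== PORT A =====
-- A's recursion, step for step, over the string's character list.
-- Where Python raises IndexError (str[0] on an empty string), the port returns []
-- (those inputs are excluded by Pre_charINnewline).
def goA : List Char → List Char
  | [] => []                                     -- Python: str[0] raises IndexError
  | c :: t =>
    let s1 := if c = '0' then t else c :: t      -- if str[0] == '0': str = str[1:]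
    if s1.length = 1 then s1 ++ ['\n']           -- if arz == 1: return str + '\n'
    else
      match s1.head? with                        -- str[0]
      | none => []                               -- Python: str[0] raises IndexError
      | some c1 => c1 :: '\n' :: goA (s1.drop 1) -- return str[0] + '\n' + charINnewline(str[1:])
termination_by s => s.length
decreasing_by
  have h1 : (if _h : c = '0' then t else c :: t).length ≤ t.length + 1 := by
    split <;> simp
  simp only [List.length_drop, List.length_cons]
  omega

def charINnewline (str : String) : String := String.ofList (goA str.toList)

-- ===== PORT B =====
-- B's while-loop: index i over the fixed string, pieces accumulated and joined once.
def goB (s : List Char) (n : Nat) (i : Nat) (parts : List (List Char)) : List Char :=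
  let j := if s[i]? = some '0' then i + 1 else i   -- if str[i] == '0': i += 1
  match hc : s[j]? with
  | none => []                                     -- Python: str[j] raises IndexError
  | some c =>
    let parts := parts ++ [[c, '\n']]              -- parts.append(str[i] + '\n')
    if j = n - 1 then parts.flatten                -- if i == n - 1: return ''.join(parts)
    else goB s n (j + 1) parts                     -- i += 1
termination_by s.length - i
decreasing_by
  have hj : j < s.length := by
    have := List.getElem?_eq_some_iff.mp hc
    exact this.1
  have : i ≤ j := by dsimp only [j]; split <;> omega
  omega

def charINnewline_alt (str : String) : String :=
  String.ofList (goB str.toList str.toList.length 0 [])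

-- ===== PRECONDITION & SPEC =====
-- tzC l = length of the maximal trailing run of '0' characters of l.
def tzC (l : List Char) : Nat := (l.reverse.takeWhile (fun c => c == '0')).length

-- Pre_ excludes exactly the inputs on which A raises IndexError: the empty string and
-- the strings whose maximal trailing run of '0' characters has ODD length (there A's
-- stepwise zero-stripping runs off the end of the string; B raises there too).
def Pre_charINnewline (str : String) : Prop :=
  str ≠ "" ∧ tzC str.toList % 2 = 0
instance (str : String) : Decidable (Pre_charINnewline str) := by
  unfold Pre_charINnewline; infer_instance

def pvWitness_charINnewline : String := "ab0c"

def Spec_charINnewline (str : String) (out : String) : Prop := out = charINnewline_alt str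
instance (str : String) (out : String) : Decidable (Spec_charINnewline str out) := by unfold Spec_charINnewline; infer_instance

-- ===== CLAIM (what is proved, stated in full; the proofs are below) =====
def Claim_equal_charINnewline : Prop := ∀ (str : String), Dom_charINnewline str → Pre_charINnewline str → Spec_charINnewline str (charINnewline str)

-- ===== LEMMAS AND PROOFS =====

lemma tzC_le (l : List Char) : tzC l ≤ l.length := by
  have := (List.takeWhile_sublist (p := fun c => c == '0') (l := l.reverse)).length_le
  simpa [tzC] using this

lemma tzC_cons (c : Char) (l : List Char) :
    tzC (c :: l) = if tzC l = l.length ∧ c = '0' then l.length + 1 else tzC l := by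
  unfold tzC
  rw [List.reverse_cons, List.takeWhile_append]
  by_cases hall : (l.reverse.takeWhile (fun c => c == '0')).length = l.reverse.length
  · rw [if_pos hall]
    by_cases hc : c = '0'
    · rw [if_pos ⟨by simpa using hall, hc⟩]
      subst hc
      simp [List.takeWhile]
    · rw [if_neg (fun h => hc h.2)]
      have hcb : (c == '0') = false := by simp [hc]
      have ht : List.takeWhile (fun x => x == '0') [c] = [] := by
        simp [List.takeWhile, hcb]
      rw [ht]
      simp only [List.length_append, List.length_nil, List.length_reverse] at *
      omega
  · rw [if_neg hall, if_neg (by intro h; exact hall (by simpa using h.1))]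

-- single-step unfolding of goB at a position where str[j] exists
lemma goB_step (s : List Char) (n i : Nat) (parts : List (List Char)) (c : Char) (j : Nat)
    (hj : (if s[i]? = some '0' then i + 1 else i) = j) (hc : s[j]? = some c) :
    goB s n i parts =
      if j = n - 1 then (parts ++ [[c, '\n']]).flatten
      else goB s n (j + 1) (parts ++ [[c, '\n']]) := by
  rw [goB]
  simp only [hj]
  split
  · rename_i hnone
    rw [hj, hc] at hnone
    cases hnone
  · rename_i c' hsome
    rw [hj, hc] at hsome
    injection hsome with h
    subst h
    rfl

lemma goB_eq_goA (s : List Char) :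
    ∀ k i parts, s.length - i = k → i < s.length → tzC (s.drop i) % 2 = 0 →
      goB s s.length i parts = parts.flatten ++ goA (s.drop i) := by
  intro k
  induction k using Nat.strong_induction_on with
  | _ k IH =>
    intro i parts hk hi hpar
    have hc : s[i]? = some s[i] := List.getElem?_eq_getElem hi
    have hdrop : s.drop i = s[i] :: s.drop (i + 1) := List.drop_eq_getElem_cons hi
    by_cases h0 : s[i] = '0'
    · -- leading '0' is stripped: both advance past it
      have hi1 : i + 1 < s.length := by
        by_contra hle
        have hnil : s.drop (i + 1) = [] := List.drop_eq_nil_of_le (by omega)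
        have : tzC (s.drop i) = 1 := by
          rw [hdrop, hnil, h0]; decide
        omega
      have hc1 : s[i + 1]? = some s[i + 1] := List.getElem?_eq_getElem hi1
      have hdrop1 : s.drop (i + 1) = s[i + 1] :: s.drop (i + 2) :=
        List.drop_eq_getElem_cons hi1
      -- parity is preserved when skipping the stripped '0' and the emitted char
      have hpar2 : tzC (s.drop (i + 2)) % 2 = 0 := by
        have e1 := tzC_cons s[i] (s.drop (i + 1))
        have e2 := tzC_cons s[i + 1] (s.drop (i + 2))
        have hle2 := tzC_le (s.drop (i + 2))
        have hlen1 : (s.drop (i + 1)).length = (s.drop (i + 2)).length + 1 := by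
          rw [hdrop1]; simp only [List.length_cons]
        rw [← hdrop1] at e2
        rw [← hdrop, h0] at e1
        simp only [and_true] at e1
        by_cases hall2 : tzC (s.drop (i + 2)) = (s.drop (i + 2)).length ∧ s[i + 1] = '0'
        · rw [if_pos hall2] at e2
          obtain ⟨h2a, -⟩ := hall2
          by_cases hall1 : tzC (s.drop (i + 1)) = (s.drop (i + 1)).length
          · rw [if_pos hall1] at e1; omega
          · rw [if_neg hall1] at e1; omega
        · rw [if_neg hall2] at e2
          by_cases hall1 : tzC (s.drop (i + 1)) = (s.drop (i + 1)).length
          · exfalso; omega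
          · rw [if_neg hall1] at e1; omega
      rw [goB_step s s.length i parts s[i + 1] (i + 1) (by rw [hc, h0]; simp) hc1]
      rw [hdrop, goA]
      simp only [h0, hdrop1]
      by_cases hend : i + 1 = s.length - 1
      · have hnil : s.drop (i + 2) = [] := List.drop_eq_nil_of_le (by omega)
        rw [if_pos hend]
        simp [hnil]
      · have hlen1 : (s[i + 1] :: s.drop (i + 2)).length ≠ 1 := by
          simp only [List.length_cons, List.length_drop]; omega
        rw [if_neg hend]
        rw [IH (s.length - (i + 2)) (by omega) (i + 2) _ rfl (by omega) hpar2]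
        have hne1 : s.length - (i + 1) ≠ 1 := by omega
        simp [hne1, hc1]
    · -- no strip: both emit s[i] and advance by one
      have hpar1 : tzC (s.drop (i + 1)) % 2 = 0 := by
        have e1 := tzC_cons s[i] (s.drop (i + 1))
        rw [← hdrop] at e1
        rw [if_neg (fun h => h0 h.2)] at e1
        omega
      rw [goB_step s s.length i parts s[i] i (by rw [hc]; simp [h0]) hc]
      rw [hdrop, goA]
      simp only [if_neg h0]
      by_cases hend : i = s.length - 1
      · have hnil : s.drop (i + 1) = [] := List.drop_eq_nil_of_le (by omega)
        rw [if_pos hend]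
        simp [hnil]
      · have hlen1 : (s[i] :: s.drop (i + 1)).length ≠ 1 := by
          simp only [List.length_cons, List.length_drop]; omega
        rw [if_neg hend]
        rw [IH (s.length - (i + 1)) (by omega) (i + 1) _ rfl (by omega) hpar1]
        rw [if_neg hlen1]
        simp
        rw [hc]

-- ===== VERDICT (by name: the statement is the Claim_ definition above) =====
theorem charINnewline_spec : Claim_equal_charINnewline := by
  intro str _ hpre
  obtain ⟨hne, hpar⟩ := hpre
  unfold Spec_charINnewline charINnewline charINnewline_alt
  have hlen : 0 < str.toList.length := by
    simp only [List.length_pos_iff]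
    intro hl
    exact hne (String.toList_eq_nil_iff.mp hl)
  rw [goB_eq_goA str.toList (str.toList.length - 0) 0 [] rfl hlen (by simpa using hpar)]
  simp
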